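-- pv_equiv track=rewrite | github.com/AbbadKamel/Markov | Markov_NTMS/new article/new_markov.py | detect_ddos
-- ===== SOURCE A (Python) =====
-- def detect_ddos(packet_counts, threshold=5000):
--     current_state = "Normal"
--     state_history = [current_state]
--
--     for packet_count in packet_counts:
--         if packet_count > threshold:
--             if current_state == "Normal":
--                 next_state = "Anomaly Detected"
--             elif current_state == "Anomaly Detected":
--                 next_state = "Mitigation in Progress"
--             elif current_state == "Mitigation in Progress":
--                 next_state = "Blocking"
--         else:
--             next_state = "Normal"
--
--         state_history.append(next_state)
--         current_state = next_state
--
--     return state_history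
-- ===== SOURCE B (Python) =====
-- def detect_ddos(packet_counts, threshold=5000):
--     # Stateless two-stage computation: precompute exceedance flags, then label
--     # each position purely from a lookback window of at most 3 flags.  The label
--     # at position i is determined by flags[i], flags[i-1], flags[i-2] alone,
--     # because A's escalation saturates after three consecutive exceedances.
--     flags = [c > threshold for c in packet_counts]
--
--     def label(i):
--         if not flags[i]:
--             return "Normal"
--         if i < 1 or not flags[i - 1]:
--             return "Anomaly Detected"
--         if i < 2 or not flags[i - 2]:
--             return "Mitigation in Progress"
--         return "Blocking"
--
--     return ["Normal"] + [label(i) for i in range(len(flags))]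
-- ===== Notes on version B (the rewrite author's own statement) =====
-- stated objective: alternative
-- what changed: Replaces A's carried string state machine with a stateless two-stage computation: a precomputed exceedance-flag list and a per-position label read purely from a lookback window of the last three flags (valid because A's escalation saturates after three consecutive exceedances).
import Mathlib
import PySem

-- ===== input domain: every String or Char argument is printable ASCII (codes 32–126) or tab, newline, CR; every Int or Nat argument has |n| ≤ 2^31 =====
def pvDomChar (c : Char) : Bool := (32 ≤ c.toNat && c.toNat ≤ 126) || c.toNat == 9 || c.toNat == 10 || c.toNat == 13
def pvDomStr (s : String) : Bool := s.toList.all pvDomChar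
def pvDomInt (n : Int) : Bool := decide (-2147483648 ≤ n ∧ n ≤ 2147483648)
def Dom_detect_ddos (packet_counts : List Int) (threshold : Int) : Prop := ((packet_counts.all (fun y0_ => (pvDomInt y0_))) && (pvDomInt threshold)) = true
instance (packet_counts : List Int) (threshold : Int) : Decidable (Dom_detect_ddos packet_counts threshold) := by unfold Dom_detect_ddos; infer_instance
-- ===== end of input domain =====

-- B replaces A's carried string state machine by a stateless two-stage computation: a flag list plus a per-position 3-flag lookback label (objective: alternative).


-- ===== PORT A =====
-- Loop of A: carries current_state and the last value assigned to next_state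
-- (Python's next_state keeps its previous value when no branch assigns it; it is
-- always bound when that fall-through runs, since current_state is then "Blocking").
def ddosLoopA : List Int → Int → String → String → List String → List String
  | [], _, _, _, acc => acc
  | x :: xs, t, cur, prevNext, acc =>
    let next :=
      if x > t then
        if cur = "Normal" then "Anomaly Detected"
        else if cur = "Anomaly Detected" then "Mitigation in Progress"
        else if cur = "Mitigation in Progress" then "Blocking"
        else prevNext
      else "Normal"
    ddosLoopA xs t next next (acc ++ [next])

-- initial prevNext is unreachable (current_state starts as "Normal")
def detect_ddos (packet_counts : List Int) (threshold : Int) : List String :=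
  ddosLoopA packet_counts threshold "Normal" "Normal" ["Normal"]

-- ===== PORT B =====
-- B's label(i): all list accesses are guarded in range, so Python's flags[j]
-- is exactly List.getD here.
def ddosFlagLabel (flags : List Bool) (i : Nat) : String :=
  if flags.getD i false = false then "Normal"
  else if i < 1 ∨ flags.getD (i - 1) false = false then "Anomaly Detected"
  else if i < 2 ∨ flags.getD (i - 2) false = false then "Mitigation in Progress"
  else "Blocking"

def detect_ddos_alt (packet_counts : List Int) (threshold : Int) : List String :=
  let flags := packet_counts.map (fun c => decide (c > threshold))
  "Normal" :: (List.range flags.length).map (ddosFlagLabel flags)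

-- ===== PRECONDITION & SPEC =====
def Spec_detect_ddos (packet_counts : List Int) (threshold : Int) (out : List String) : Prop := out = detect_ddos_alt packet_counts threshold
instance (packet_counts : List Int) (threshold : Int) (out : List String) : Decidable (Spec_detect_ddos packet_counts threshold out) := by unfold Spec_detect_ddos; infer_instance

-- ===== CLAIM (what is proved, stated in full; the proofs are below) =====
def Claim_equal_detect_ddos : Prop := ∀ (packet_counts : List Int) (threshold : Int), Dom_detect_ddos packet_counts threshold → Spec_detect_ddos packet_counts threshold (detect_ddos packet_counts threshold)

-- ===== LEMMAS AND PROOFS =====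
-- Reference recursion carrying the two previous flags; both ports reduce to it.
def winLoop : List Bool → Bool → Bool → List String
  | [], _, _ => []
  | b :: bs, p1, p2 =>
    (if b = false then "Normal"
     else if p1 = false then "Anomaly Detected"
     else if p2 = false then "Mitigation in Progress"
     else "Blocking") :: winLoop bs b p1

theorem winB_eq (rest : List Bool) : ∀ (pre : List Bool) (p1 p2 : Bool),
    (if pre.length < 1 then p1 = false else p1 = pre.getD (pre.length - 1) false) →
    (if pre.length < 2 then p2 = false else p2 = pre.getD (pre.length - 2) false) →
    (List.range' pre.length rest.length).map (ddosFlagLabel (pre ++ rest)) = winLoop rest p1 p2 := by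
  induction rest with
  | nil => intro pre p1 p2 _ _; simp [winLoop]
  | cons b bs ih =>
    intro pre p1 p2 h1 h2
    have hb : (pre ++ b :: bs).getD pre.length false = b := by
      simp [List.getD_eq_getElem?_getD]
    have hhead : ddosFlagLabel (pre ++ b :: bs) pre.length =
        (if b = false then "Normal"
         else if p1 = false then "Anomaly Detected"
         else if p2 = false then "Mitigation in Progress"
         else "Blocking") := by
      unfold ddosFlagLabel
      rw [hb]
      rcases pre with _ | ⟨a, pre'⟩
      · simp at h1
        simp [h1]
      · have hlen : ¬ ((a :: pre').length < 1) := by simp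
        have h1' : p1 = (a :: pre').getD ((a :: pre').length - 1) false := by
          simpa [hlen] using h1
        have hg1 : ((a :: pre') ++ b :: bs).getD ((a :: pre').length - 1) false
            = (a :: pre').getD ((a :: pre').length - 1) false :=
          List.getD_append _ _ _ _ (by simp only [List.length_cons]; omega)
        rcases pre' with _ | ⟨a2, pre''⟩
        · simp at h2
          simp only [hg1, ← h1']
          simp [h2]
        · have hlen2 : ¬ ((a :: a2 :: pre'').length < 2) := by simp
          have h2' : p2 = (a :: a2 :: pre'').getD ((a :: a2 :: pre'').length - 2) false := by
            simpa [hlen2] using h2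
          have hg2 : ((a :: a2 :: pre'') ++ b :: bs).getD ((a :: a2 :: pre'').length - 2) false
              = (a :: a2 :: pre'').getD ((a :: a2 :: pre'').length - 2) false :=
            List.getD_append _ _ _ _ (by simp only [List.length_cons]; omega)
          simp only [hg1, hg2, ← h1', ← h2']
          simp
    have htail : (List.range' (pre.length + 1) bs.length).map (ddosFlagLabel (pre ++ b :: bs))
        = winLoop bs b p1 := by
      have hassoc : pre ++ b :: bs = (pre ++ [b]) ++ bs := by simp
      have hlen' : (pre ++ [b]).length = pre.length + 1 := by simp
      have := ih (pre ++ [b]) b p1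
        (by
          simp only [hlen']
          rw [if_neg (by omega)]
          simp [List.getD_eq_getElem?_getD])
        (by
          simp only [hlen']
          rcases pre with _ | ⟨a, pre'⟩
          · simp at h1; simp [h1]
          · rw [if_neg (by simp)]
            have hlen : ¬ ((a :: pre').length < 1) := by simp
            have h1' : p1 = (a :: pre').getD ((a :: pre').length - 1) false := by
              simpa [hlen] using h1
            rw [h1']
            have hidx : (a :: pre').length + 1 - 2 = (a :: pre').length - 1 := by
              simp only [List.length_cons]; omega
            have : ((a :: pre') ++ [b]).getD ((a :: pre').length + 1 - 2) false
                = (a :: pre').getD ((a :: pre').length - 1) false := by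
              rw [hidx]
              exact List.getD_append _ _ _ _ (by simp only [List.length_cons]; omega)
            simpa using this.symm)
      rw [hassoc]
      simpa [hlen'] using this
    rw [show (b :: bs).length = bs.length + 1 from rfl, List.range'_succ, List.map_cons, hhead, winLoop, htail]

theorem winA_eq (xs : List Int) : ∀ (t : Int) (p1 p2 : Bool) (cur : String) (acc : List String),
    ((p1 = false ∧ cur = "Normal") ∨
     (p1 = true ∧ p2 = false ∧ cur = "Anomaly Detected") ∨
     (p1 = true ∧ p2 = true ∧ (cur = "Mitigation in Progress" ∨ cur = "Blocking"))) →
    ddosLoopA xs t cur cur acc = acc ++ winLoop (xs.map (fun c => decide (c > t))) p1 p2 := by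
  induction xs with
  | nil => intro t p1 p2 cur acc _; simp [ddosLoopA, winLoop]
  | cons x xs ih =>
    intro t p1 p2 cur acc hinv
    by_cases hx : x > t
    · rcases hinv with ⟨hp1, hc⟩ | ⟨hp1, hp2, hc⟩ | ⟨hp1, hp2, hc⟩
      · subst hc hp1
        simpa [ddosLoopA, winLoop, hx] using
          ih t true false "Anomaly Detected" (acc ++ ["Anomaly Detected"]) (by simp)
      · subst hc hp1 hp2
        simpa [ddosLoopA, winLoop, hx] using
          ih t true true "Mitigation in Progress" (acc ++ ["Mitigation in Progress"]) (by simp)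
      · subst hp1 hp2
        rcases hc with hc | hc <;> subst hc <;>
          simpa [ddosLoopA, winLoop, hx] using
            ih t true true "Blocking" (acc ++ ["Blocking"]) (by simp)
    · rcases hinv with ⟨hp1, hc⟩ | ⟨hp1, hp2, hc⟩ | ⟨hp1, hp2, hc⟩
      · subst hc hp1
        simpa [ddosLoopA, winLoop, hx] using
          ih t false false "Normal" (acc ++ ["Normal"]) (by simp)
      · subst hc hp1 hp2
        simpa [ddosLoopA, winLoop, hx] using
          ih t false true "Normal" (acc ++ ["Normal"]) (by simp)
      · subst hp1 hp2
        rcases hc with hc | hc <;> subst hc <;>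
          simpa [ddosLoopA, winLoop, hx] using
            ih t false true "Normal" (acc ++ ["Normal"]) (by simp)

-- ===== VERDICT (by name: the statement is the Claim_ definition above) =====
theorem detect_ddos_spec : Claim_equal_detect_ddos := by
  intro pcs t _
  unfold Spec_detect_ddos detect_ddos detect_ddos_alt
  rw [winA_eq pcs t false false "Normal" ["Normal"] (by simp)]
  have h := winB_eq (pcs.map (fun c => decide (c > t))) [] false false (by simp) (by simp)
  simp only [List.nil_append, List.length_nil, List.length_map] at h
  rw [← List.range_eq_range'] at h
  simp only [gt_iff_lt] at h ⊢
  rw [← h]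
  simp
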